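-- pv_equiv track=rewrite | github.com/qwetboy10/DumbTextTool | tests/nth_letter_sentance_mod.py | solve_verbose
-- ===== SOURCE A (Python) =====
-- def solve_verbose(text):
--     words = text.split('.')
--     words = filter(lambda line: len(line) > 0, words)
--     words = list(map(lambda line: line.strip(), words))
--     min_len = max(map(lambda w: len(w),words))
--     ret = []
--     for i in range(1,min_len):
--         ret.append(''.join(map(lambda w: w[i % len(w)], words)))
--     return ret
-- ===== SOURCE B (Python) =====
-- def solve_verbose(text):
--     words = text.split('.')
--     words = filter(lambda line: len(line) > 0, words)
--     words = list(map(lambda line: line.strip(), words))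
--     min_len = max(map(lambda w: len(w), words))
--     rows = [[w[i % len(w)] for i in range(1, min_len)] for w in words]
--     return [''.join(col) for col in zip(*rows)]
-- ===== Notes on version B (the rewrite author's own statement) =====
-- stated objective: alternative
-- what changed: The outer index-loop with an inner per-word scan is replaced by building one cyclic-letter row per word and transposing with zip(*rows), flipping the loop nesting and materializing a row matrix.
import Mathlib
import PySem

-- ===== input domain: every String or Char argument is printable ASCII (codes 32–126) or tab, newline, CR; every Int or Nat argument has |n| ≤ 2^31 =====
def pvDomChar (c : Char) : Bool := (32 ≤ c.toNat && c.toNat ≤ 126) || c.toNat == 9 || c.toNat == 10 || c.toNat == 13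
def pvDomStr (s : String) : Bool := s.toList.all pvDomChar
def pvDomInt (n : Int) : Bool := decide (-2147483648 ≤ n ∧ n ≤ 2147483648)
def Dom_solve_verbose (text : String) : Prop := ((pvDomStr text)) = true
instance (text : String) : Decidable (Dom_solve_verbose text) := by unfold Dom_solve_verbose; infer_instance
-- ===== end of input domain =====

-- B builds one cyclic-letter row per word and transposes (zip) instead of A's outer index-loop with an inner per-word scan; alternative decomposition, same cost.


-- ===== PORT A =====
-- w[i % len(w)] — a single char (Python's 1-char string); ''.join of such chars = String.mk of the char list
def pvCyc (w : String) (i : Int) : Char :=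
  (PySem.Str.pyGet? w (PySem.Int.mod i (PySem.Str.len w))).getD ' '

def solve_verbose (text : String) : List String :=
  let words0 := (PySem.Str.split? text ".").getD []
  let words1 := words0.filter (fun line => decide (0 < PySem.Str.len line))
  let words := words1.map (fun line => PySem.Str.strip line)
  let min_len := ((PySem.List.max? (words.map (fun w => PySem.Str.len w)) (fun x => x)).getD 0)
  (PySem.List.pyRange 1 min_len 1).foldl
    (fun ret i => ret ++ [String.mk (words.map (fun w => pvCyc w i))]) []

-- ===== PORT B =====
-- zip(*rows): take the head of every row while all rows are nonempty; fuel = length of the first row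
def pvTranspGo {α : Type} : Nat → List (List α) → List (List α)
  | 0, _ => []
  | Nat.succ n, rows =>
    match rows.mapM List.head? with
    | none => []
    | some heads => heads :: pvTranspGo n (rows.map List.tail)

def pvTransp {α : Type} (rows : List (List α)) : List (List α) :=
  pvTranspGo (match rows with | [] => 0 | r :: _ => r.length) rows

def solve_verbose_alt (text : String) : List String :=
  let words0 := (PySem.Str.split? text ".").getD []
  let words1 := words0.filter (fun line => decide (0 < PySem.Str.len line))
  let words := words1.map (fun line => PySem.Str.strip line)
  let min_len := ((PySem.List.max? (words.map (fun w => PySem.Str.len w)) (fun x => x)).getD 0)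
  let rows := words.map (fun w => (PySem.List.pyRange 1 min_len 1).map (fun i => pvCyc w i))
  (pvTransp rows).map (fun col => String.mk col)

-- ===== PRECONDITION & SPEC =====
-- Pre_ excludes exactly the inputs where Python A raises: ValueError from max() when every '.'-piece is
-- empty, and ZeroDivisionError from i % len(w) when some stripped word is empty while another has length ≥ 2.
def Pre_solve_verbose (text : String) : Prop :=
  let words := (((PySem.Str.split? text ".").getD []).filter
      (fun line => decide (0 < PySem.Str.len line))).map (fun line => PySem.Str.strip line)
  words ≠ [] ∧ ((∀ w ∈ words, PySem.Str.len w ≤ 1) ∨ (∀ w ∈ words, w ≠ ""))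
instance (text : String) : Decidable (Pre_solve_verbose text) := by unfold Pre_solve_verbose; infer_instance

def pvWitness_solve_verbose : String := "abc. de f .xy"

def Spec_solve_verbose (text : String) (out : List String) : Prop := out = solve_verbose_alt text
instance (text : String) (out : List String) : Decidable (Spec_solve_verbose text out) := by unfold Spec_solve_verbose; infer_instance

-- ===== CLAIM (what is proved, stated in full; the proofs are below) =====
def Claim_equal_solve_verbose : Prop := ∀ (text : String), Dom_solve_verbose text → Pre_solve_verbose text → Spec_solve_verbose text (solve_verbose text)

-- ===== LEMMAS AND PROOFS =====

lemma pv_mapM_head?_cons {α β : Type} (a : β → α) (t : β → List α) (l : List β) :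
    (l.map (fun w => a w :: t w)).mapM List.head? = some (l.map a) := by
  induction l with
  | nil => rfl
  | cons x xs ih => simp [List.mapM_cons, ih]

lemma pv_transpGo_map {α β : Type} (f : β → Int → α) :
    ∀ (r : List Int) (ws : List β),
      pvTranspGo r.length (ws.map (fun w => r.map (fun i => f w i)))
        = r.map (fun i => ws.map (fun w => f w i)) := by
  intro r
  induction r with
  | nil => intro ws; rfl
  | cons i r' ih =>
    intro ws
    simp only [List.map_cons, List.length_cons, pvTranspGo,
      pv_mapM_head?_cons (fun w => f w i) (fun w => r'.map (fun j => f w j))]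
    have htail : (ws.map (fun w => f w i :: r'.map (fun j => f w j))).map List.tail
        = ws.map (fun w => r'.map (fun j => f w j)) := by
      simp [List.map_map]
    rw [htail, ih]

lemma pv_transp_map_cons {α β : Type} (f : β → Int → α) (r : List Int) (w : β) (ws' : List β) :
    pvTransp ((w :: ws').map (fun w => r.map (fun i => f w i)))
      = r.map (fun i => (w :: ws').map (fun w => f w i)) := by
  have h := pv_transpGo_map f r (w :: ws')
  simp only [pvTransp, List.map_cons] at h ⊢
  simpa [List.length_map] using h

-- common shape of both ports after the shared preamble; the hypothesis covers the all-filtered-out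
-- case, where A's range is empty and B's zip of no rows is empty
lemma pv_main {β : Type} (f : β → Int → Char) (ws : List β) (r : List Int)
    (h : ws = [] → r = []) :
    r.foldl (fun ret i => ret ++ [String.mk (ws.map (fun w => f w i))]) []
      = (pvTransp (ws.map (fun w => r.map (fun i => f w i)))).map (fun col => String.mk col) := by
  rw [PySem.List.foldl_append_singleton_eq_map, List.nil_append]
  cases ws with
  | nil => rw [h rfl]; rfl
  | cons w ws' =>
    rw [pv_transp_map_cons, List.map_map]
    rfl

-- ===== VERDICT (by name: the statement is the Claim_ definition above) =====
theorem solve_verbose_spec : Claim_equal_solve_verbose := by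
  intro text _ _
  simp only [Spec_solve_verbose, solve_verbose, solve_verbose_alt]
  refine pv_main pvCyc _ _ ?_
  intro hw
  rw [hw]
  have hmax : PySem.List.max? (([] : List String).map (fun w => PySem.Str.len w)) (fun x => x) = none := by
    rw [PySem.List.max?_eq_none_iff]; rfl
  rw [hmax]
  exact PySem.List.pyRange_one_eq_nil (by simp)
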